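-- pv_equiv track=rewrite | github.com/wboudy/VozBot | vozbot/agent/tools/schemas.py | validate_no_sensitive_data
-- ===== SOURCE A (Python) =====
-- SENSITIVE_FIELD_PATTERNS = [
--     "ssn",
--     "social_security",
--     "dob",
--     "date_of_birth",
--     "birth_date",
--     "birthdate",
--     "credit_card",
--     "card_number",
--     "cvv",
--     "expiry",
--     "payment",
--     "bank_account",
--     "routing_number",
--     "pin",
--     "password",
-- ]
--
-- def validate_no_sensitive_data(value: str, field_name: str) -> str:
--     """Validate that field values don't contain sensitive data patterns.
--
--     Args:
--         value: The value to check.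
--         field_name: Name of the field being validated.
--
--     Returns:
--         The validated value.
--
--     Raises:
--         ValueError: If sensitive data pattern detected.
--     """
--     lower_value = value.lower()
--     for pattern in SENSITIVE_FIELD_PATTERNS:
--         if pattern in lower_value:
--             raise ValueError(
--                 f"Field '{field_name}' appears to contain sensitive information. "
--                 f"Do not collect SSN, DOB, or payment information."
--             )
--     return value
-- ===== SOURCE B (Python) =====
-- SENSITIVE_FIELD_PATTERNS = [
--     "ssn",
--     "social_security",
--     "dob",
--     "date_of_birth",
--     "birth_date",
--     "birthdate",
--     "credit_card",
--     "card_number",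
--     "cvv",
--     "expiry",
--     "payment",
--     "bank_account",
--     "routing_number",
--     "pin",
--     "password",
-- ]
--
-- def validate_no_sensitive_data(value: str, field_name: str) -> str:
--     """Scan the lowered value position by position, testing each pattern as a
--     prefix of the current suffix (one left-to-right scan over positions instead
--     of one substring search per pattern)."""
--     lower_value = value.lower()
--     for i in range(len(lower_value) + 1):
--         if any(lower_value.startswith(p, i) for p in SENSITIVE_FIELD_PATTERNS):
--             raise ValueError(
--                 f"Field '{field_name}' appears to contain sensitive information. "
--                 f"Do not collect SSN, DOB, or payment information."
--             )
--     return value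
-- ===== Notes on version B (the rewrite author's own statement) =====
-- stated objective: alternative
-- what changed: A loops over the 15 patterns doing one substring search each; B makes a single left-to-right scan over positions of the lowered value, testing every pattern as a prefix at the current position.
import Mathlib
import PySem

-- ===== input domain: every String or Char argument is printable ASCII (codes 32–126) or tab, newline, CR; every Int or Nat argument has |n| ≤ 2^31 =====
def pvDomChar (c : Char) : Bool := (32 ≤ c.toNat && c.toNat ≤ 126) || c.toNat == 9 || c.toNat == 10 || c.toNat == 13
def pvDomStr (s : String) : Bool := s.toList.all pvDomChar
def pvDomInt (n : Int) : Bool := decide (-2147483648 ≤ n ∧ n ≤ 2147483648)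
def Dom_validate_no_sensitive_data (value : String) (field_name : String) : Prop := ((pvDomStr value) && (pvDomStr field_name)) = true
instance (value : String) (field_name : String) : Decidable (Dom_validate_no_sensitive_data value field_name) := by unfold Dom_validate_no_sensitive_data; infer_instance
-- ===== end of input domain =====

-- B replaces A's per-pattern substring loop by a single left-to-right scan over
-- positions of the lowered value, testing each pattern as a prefix there (alternative).
-- A raises ValueError when a pattern occurs; those inputs are outside Pre_.

def sensitiveFieldPatterns : List String :=
  ["ssn", "social_security", "dob", "date_of_birth", "birth_date", "birthdate",
   "credit_card", "card_number", "cvv", "expiry", "payment", "bank_account",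
   "routing_number", "pin", "password"]

-- ===== PORT A =====
-- the 'for pattern in SENSITIVE_FIELD_PATTERNS: if pattern in lower_value: raise' loop
def checkA (lower : String) : List String → Bool
  | [] => false
  | p :: ps => if PySem.Str.isIn p lower then true else checkA lower ps

def validate_no_sensitive_data (value : String) (field_name : String) : String :=
  let lower_value := PySem.Str.lower value
  if checkA lower_value sensitiveFieldPatterns then
    ""  -- Python raises ValueError here; unreachable under Pre_
  else value

-- ===== PORT B =====
-- one scan over positions (suffixes) of the lowered value; at each position test
-- every pattern as a prefix (Source B's startswith(p, i) loop)
def scanB (pats : List (List Char)) : List Char → Bool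
  | [] => pats.any (fun p => p.isPrefixOf ([] : List Char))
  | c :: rest => pats.any (fun p => p.isPrefixOf (c :: rest)) || scanB pats rest

def validate_no_sensitive_data_alt (value : String) (field_name : String) : String :=
  let lowerChars := PySem.Chars.lower value.toList
  if scanB (sensitiveFieldPatterns.map String.toList) lowerChars then
    ""  -- raise ValueError, unreachable under Pre_
  else value

-- ===== PRECONDITION & SPEC =====
-- Pre_ excludes exactly the inputs on which A raises ValueError (some sensitive
-- pattern occurs in value.lower()).
def Pre_validate_no_sensitive_data (value : String) (field_name : String) : Prop :=
  (sensitiveFieldPatterns.all (fun p => !PySem.Str.isIn p (PySem.Str.lower value))) = true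

instance (value : String) (field_name : String) : Decidable (Pre_validate_no_sensitive_data value field_name) := by
  unfold Pre_validate_no_sensitive_data; infer_instance

def pvWitness_validate_no_sensitive_data : String × String := ("hello world", "name")

def Spec_validate_no_sensitive_data (value : String) (field_name : String) (out : String) : Prop := out = validate_no_sensitive_data_alt value field_name
instance (value : String) (field_name : String) (out : String) : Decidable (Spec_validate_no_sensitive_data value field_name out) := by unfold Spec_validate_no_sensitive_data; infer_instance

-- ===== CLAIM (what is proved, stated in full; the proofs are below) =====
def Claim_equal_validate_no_sensitive_data : Prop := ∀ (value : String) (field_name : String), Dom_validate_no_sensitive_data value field_name → Pre_validate_no_sensitive_data value field_name → Spec_validate_no_sensitive_data value field_name (validate_no_sensitive_data value field_name)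

-- ===== LEMMAS AND PROOFS =====

-- A's loop is the disjunction over patterns
theorem checkA_eq_any (lower : String) (ps : List String) :
    checkA lower ps = ps.any (fun p => PySem.Str.isIn p lower) := by
  induction ps with
  | nil => rfl
  | cons p ps ih => cases h : PySem.Str.isIn p lower <;> simp [checkA, ih, h] <;> rfl

-- if B's scan fires, some pattern is an infix of the scanned list
theorem scanB_infix (pats : List (List Char)) (cs : List Char) (h : scanB pats cs = true) :
    ∃ p ∈ pats, p <:+: cs := by
  induction cs with
  | nil =>
    simp only [scanB, List.any_eq_true] at h
    obtain ⟨p, hp, hpre⟩ := h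
    exact ⟨p, hp, (List.isPrefixOf_iff_prefix.mp hpre).isInfix⟩
  | cons c rest ih =>
    simp only [scanB, Bool.or_eq_true, List.any_eq_true] at h
    rcases h with ⟨p, hp, hpre⟩ | htail
    · exact ⟨p, hp, (List.isPrefixOf_iff_prefix.mp hpre).isInfix⟩
    · obtain ⟨p, hp, hinf⟩ := ih htail
      exact ⟨p, hp, hinf.trans (List.suffix_cons c rest).isInfix⟩

-- ===== VERDICT (by name: the statement is the Claim_ definition above) =====
theorem validate_no_sensitive_data_spec : Claim_equal_validate_no_sensitive_data := by
  intro value field_name _ hpre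
  unfold Spec_validate_no_sensitive_data
  unfold Pre_validate_no_sensitive_data at hpre
  simp only [List.all_eq_true, Bool.not_eq_true'] at hpre
  have hA : checkA (PySem.Str.lower value) sensitiveFieldPatterns = false := by
    rw [checkA_eq_any]
    simp only [List.any_eq_false]
    intro x hx
    have h := hpre x hx
    simp only [PySem.Str.isIn_eq, PySem.Str.toList_lower] at h
    simp [h]
  have hB : scanB (sensitiveFieldPatterns.map String.toList)
      (PySem.Chars.lower value.toList) = false := by
    by_contra hne
    have ht : scanB (sensitiveFieldPatterns.map String.toList)
        (PySem.Chars.lower value.toList) = true := by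
      cases hx : scanB (sensitiveFieldPatterns.map String.toList)
          (PySem.Chars.lower value.toList) <;> simp_all
    obtain ⟨p, hp, hinf⟩ := scanB_infix _ _ ht
    obtain ⟨q, hq, rfl⟩ := List.mem_map.mp hp
    have hC : PySem.Chars.isIn q.toList (PySem.Chars.lower value.toList) = true :=
      (PySem.Chars.isIn_iff_infix _ _).mpr hinf
    have hf := hpre q hq
    simp only [PySem.Str.isIn_eq, PySem.Str.toList_lower] at hf
    simp [hf] at hC
  simp [validate_no_sensitive_data, validate_no_sensitive_data_alt, hA, hB]
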